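-- pv_equiv track=rewrite | github.com/Nytro69/pythonProject | exercises/super_collapse.py | gravity
-- ===== SOURCE A (Python) =====
-- def gravity(board):
--     for i in range(len(board) - 1, -1, -1):
--         for j in range(len(board[0])):
--             if board[i][j] == 0:
--                 for k in range(i - 1, -1, -1):
--                     if board[k][j]!= 0:
--                         board[i][j], board[k][j] = board[k][j], board[i][j]
--                         break
--     return board
-- ===== SOURCE B (Python) =====
-- def gravity(board):
--     # Gravity, one column at a time: pull out the column, stable-compact it
--     # (zeros float to the top, non-zeros keep their order at the bottom),
--     # and write it back in place.
--     if not board: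
--         return board
--     for j in range(len(board[0])):
--         column = [row[j] for row in board]
--         nz = [x for x in column if x != 0]
--         new_col = [0] * (len(column) - len(nz)) + nz
--         for row, v in zip(board, new_col):
--             row[j] = v
--     return board
-- ===== Notes on version B (the rewrite author's own statement) =====
-- stated objective: alternative
-- what changed: A drops values cell by cell, scanning upward from every zero cell and swapping; B processes each column once: it extracts the column, stable-compacts it (zeros on top, non-zeros in order at the bottom) and writes it back in place; Pre_ excludes only the boards on which A raises IndexError (a row shorter than the first row).
import Mathlib
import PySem

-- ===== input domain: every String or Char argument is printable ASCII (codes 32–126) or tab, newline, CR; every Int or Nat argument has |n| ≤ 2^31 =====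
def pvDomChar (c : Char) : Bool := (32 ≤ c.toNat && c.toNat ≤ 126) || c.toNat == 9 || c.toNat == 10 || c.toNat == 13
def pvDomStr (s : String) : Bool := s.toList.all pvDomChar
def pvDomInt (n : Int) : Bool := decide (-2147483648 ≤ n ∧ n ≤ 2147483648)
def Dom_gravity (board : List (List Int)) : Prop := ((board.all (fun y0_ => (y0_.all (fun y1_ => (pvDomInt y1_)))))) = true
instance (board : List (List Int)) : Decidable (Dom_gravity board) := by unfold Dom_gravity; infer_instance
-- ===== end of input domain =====

-- B replaces A's quadratic per-cell upward search-and-swap by one stable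
-- compaction pass per column (zeros on top, non-zeros kept in order at the
-- bottom), written back in place. Like A, B mutates its argument in place and
-- returns it; the equivalence proved here is about the return value.

-- ===== PORT A =====
-- board[i][j] read (defaults only reached outside Pre_gravity)
def pvCell (b : List (List Int)) (i j : Nat) : Int := (b.getD i []).getD j 0
-- board[i][j] = v
def pvSetCell (b : List (List Int)) (i j : Nat) (v : Int) : List (List Int) :=
  b.modify i (fun r => r.set j v)
-- 'for k in range(i-1,-1,-1): if board[k][j] != 0: swap; break'
def pvKScan (b : List (List Int)) (i j : Nat) : List Nat → List (List Int)
  | [] => b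
  | k :: ks =>
      if pvCell b k j ≠ 0 then
        pvSetCell (pvSetCell b i j (pvCell b k j)) k j (pvCell b i j)
      else pvKScan b i j ks
-- body of the j-loop for row i
def pvCellOp (i : Nat) (b : List (List Int)) (j : Nat) : List (List Int) :=
  if pvCell b i j = 0 then pvKScan b i j (List.range i).reverse else b
def gravity (board : List (List Int)) : List (List Int) :=
  (List.range board.length).reverse.foldl
    (fun b i => (List.range (b.headD []).length).foldl (pvCellOp i) b) board

-- ===== PORT B =====
-- 'for j in range(len(board[0])): column = [row[j] for row in board]; compact;
--  for row, v in zip(board, new_col): row[j] = v'; zip is full here since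
-- new_col has one value per row
def gravity_alt (board : List (List Int)) : List (List Int) :=
  if board = [] then board
  else
    (List.range (board.headD []).length).foldl
      (fun b j =>
        let column := b.map (fun row => row.getD j 0)
        let nz := column.filter (fun x => x ≠ 0)
        let newCol := List.replicate (column.length - nz.length) 0 ++ nz
        (b.zip newCol).map (fun p => p.1.set j p.2))
      board

-- ===== PRECONDITION & SPEC =====
-- Pre_ is exactly A's non-raising domain: A reads board[i][j] for every row i
-- and every j < len(board[0]) and raises IndexError on a row shorter than the
-- first row.
def Pre_gravity (board : List (List Int)) : Prop :=
  ∀ row ∈ board, (board.headD []).length ≤ row.length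
instance (board : List (List Int)) : Decidable (Pre_gravity board) := by
  unfold Pre_gravity; infer_instance
def pvWitness_gravity : List (List Int) := [[0, 1], [2, 0], [0, 0]]
def Spec_gravity (board : List (List Int)) (out : List (List Int)) : Prop := out = gravity_alt board
instance (board : List (List Int)) (out : List (List Int)) : Decidable (Spec_gravity board out) := by unfold Spec_gravity; infer_instance

-- ===== CLAIM (what is proved, stated in full; the proofs are below) =====
def Claim_equal_gravity : Prop := ∀ (board : List (List Int)), Dom_gravity board → Pre_gravity board → Spec_gravity board (gravity board)

-- ===== LEMMAS AND PROOFS =====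

-- ---- small getD/set/take helpers ----
theorem pv_take_set_lt (l : List Int) (i t : Nat) (a : Int) (h : i < t) :
    (l.set i a).take t = (l.take t).set i a := by
  apply List.ext_getElem <;> simp [List.getElem_set, List.getElem_take]

theorem pv_take_set_ge (l : List Int) (i t : Nat) (a : Int) (h : t ≤ i) :
    (l.set i a).take t = l.take t := by
  apply List.ext_getElem
  · simp
  · intro m h1 h2
    have hm : m < t := by simp [List.length_take] at h1; omega
    simp only [List.getElem_take, List.getElem_set]
    rw [if_neg (by omega)]

-- ---- the per-column functional version of A ----
def pvColScan (c : List Int) (i : Nat) : List Nat → List Int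
  | [] => c
  | k :: ks =>
      if c.getD k 0 ≠ 0 then (c.set i (c.getD k 0)).set k (c.getD i 0)
      else pvColScan c i ks
def pvColStep (i : Nat) (c : List Int) : List Int :=
  if c.getD i 0 = 0 then pvColScan c i (List.range i).reverse else c
def pvColA (n : Nat) (c : List Int) : List Int :=
  (List.range n).reverse.foldl (fun c i => pvColStep i c) c

def pvCompact (c : List Int) : List Int :=
  List.replicate (c.length - (c.filter (fun x => x ≠ 0)).length) 0 ++ c.filter (fun x => x ≠ 0)

def pvCols (board : List (List Int)) : List (List Int) :=
  (List.range (board.headD []).length).map (fun j => board.map (fun row => row.getD j 0))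

def pvRecompose (board cs : List (List Int)) : List (List Int) :=
  board.mapIdx (fun i row => row.mapIdx (fun j x => if j < cs.length then (cs.getD j []).getD i 0 else x))

-- ---- length bookkeeping ----
theorem pvColScan_cons (c : List Int) (i k : Nat) (ks : List Nat) :
    pvColScan c i (k :: ks) =
      if c.getD k 0 ≠ 0 then (c.set i (c.getD k 0)).set k (c.getD i 0)
      else pvColScan c i ks := rfl

theorem pv_length_colScan (c : List Int) (i : Nat) (ks : List Nat) :
    (pvColScan c i ks).length = c.length := by
  induction ks with
  | nil => rfl
  | cons k ks ih =>
      rw [pvColScan_cons]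
      split
      · simp
      · exact ih

theorem pv_length_colStep (i : Nat) (c : List Int) :
    (pvColStep i c).length = c.length := by
  rw [pvColStep]
  split
  · exact pv_length_colScan ..
  · rfl

theorem pv_length_compact (c : List Int) : (pvCompact c).length = c.length := by
  have := List.length_filter_le (fun x : Int => !decide (x = 0)) c
  simp [pvCompact]; omega

-- ---- scan specification ----
theorem pv_scan_spec (t : Nat) (i : Nat) (c : List Int) :
    (pvColScan c i (List.range t).reverse = c ∧ ∀ k, k < t → c.getD k 0 = 0)
    ∨ ∃ k, k < t ∧ c.getD k 0 ≠ 0 ∧ (∀ k', k < k' → k' < t → c.getD k' 0 = 0) ∧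
        pvColScan c i (List.range t).reverse = (c.set i (c.getD k 0)).set k (c.getD i 0) := by
  induction t with
  | zero => left; constructor; rfl; omega
  | succ t ih =>
      have hr : (List.range (t+1)).reverse = t :: (List.range t).reverse := by
        rw [List.range_succ]; simp
      by_cases h : c.getD t 0 ≠ 0
      · right; exact ⟨t, by omega, h, by omega, by rw [hr, pvColScan_cons, if_pos h]⟩
      · rw [not_not] at h
        have hstep : pvColScan c i (List.range (t+1)).reverse = pvColScan c i (List.range t).reverse := by
          rw [hr, pvColScan_cons, if_neg (not_not_intro h)]
        rcases ih with ⟨he, hz⟩ | ⟨k, hk, hnz, hbet, he⟩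
        · left
          refine ⟨by rw [hstep, he], ?_⟩
          intro k hk
          rcases Nat.lt_succ_iff_lt_or_eq.mp hk with h' | h'
          · exact hz k h'
          · rw [h']; exact h
        · right
          refine ⟨k, by omega, hnz, ?_, by rw [hstep, he]⟩
          intro k' h1 h2
          rcases Nat.lt_succ_iff_lt_or_eq.mp h2 with h' | h'
          · exact hbet k' h1 h'
          · rw [h']; exact h

-- ---- the column theorem: A's per-column process is stable compaction ----
theorem pv_filter_take_all_zero (c : List Int) (t : Nat)
    (hz : ∀ k, k < t → c.getD k 0 = 0) :
    (c.take t).filter (fun x => x ≠ 0) = [] := by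
  rw [List.filter_eq_nil_iff]
  intro a ha
  rcases List.mem_iff_getElem.mp ha with ⟨m, hm, rfl⟩
  have hml : m < c.length := by simp [List.length_take] at hm; omega
  have hmt : m < t := by simp [List.length_take] at hm; omega
  have h0 := hz m hmt
  rw [List.getD_eq_getElem?_getD, List.getElem?_eq_getElem hml] at h0
  simp only [Option.getD_some] at h0
  simp [List.getElem_take, h0]

theorem pv_take_eq_concat (v : List Int) (t : Nat) (h : t < v.length) :
    v.take (t+1) = v.take t ++ [v[t]'h] := by
  rw [List.take_add_one]
  simp [List.getElem?_eq_getElem h]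

theorem pv_filter_drop_between (v : List Int) (k t : Nat) (hk : k < t)
    (hbet : ∀ k', k < k' → k' < t → v.getD k' 0 = 0) :
    ((v.take t).drop (k+1)).filter (fun x => x ≠ 0) = [] := by
  rw [List.filter_eq_nil_iff]
  intro a ha
  rcases List.mem_iff_getElem.mp ha with ⟨m, hm, rfl⟩
  have h1 : k+1+m < t ∧ k+1+m < v.length := by
    simp [List.length_drop, List.length_take] at hm; omega
  have h0 := hbet (k+1+m) (by omega) h1.1
  rw [List.getD_eq_getElem?_getD, List.getElem?_eq_getElem h1.2] at h0
  simp only [Option.getD_some] at h0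
  simp [List.getElem_drop, List.getElem_take, h0]

theorem pv_compact_getElem_lt (c0 : List Int) (t : Nat)
    (h : t < c0.length - (c0.filter (fun x => x ≠ 0)).length)
    (h2 : t < (pvCompact c0).length) :
    (pvCompact c0)[t]'h2 = 0 := by
  unfold pvCompact at h2 ⊢
  rw [List.getElem_append_left (by simpa using h)]
  simp

theorem pv_compact_getElem_ge (c0 : List Int) (t : Nat)
    (h1 : c0.length - (c0.filter (fun x => x ≠ 0)).length ≤ t)
    (h2 : t < (pvCompact c0).length)
    (h3 : t - (c0.length - (c0.filter (fun x => x ≠ 0)).length) <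
      (c0.filter (fun x => x ≠ 0)).length) :
    (pvCompact c0)[t]'h2 =
      (c0.filter (fun x => x ≠ 0))[t - (c0.length - (c0.filter (fun x => x ≠ 0)).length)]'h3 := by
  unfold pvCompact at h2 ⊢
  rw [List.getElem_append_right (by simpa using h1)]
  simp

theorem pv_drop_succ_set (v : List Int) (t k : Nat) (a b : Int) (hk : k < t) :
    ((v.set t a).set k b).drop (t+1) = v.drop (t+1) := by
  apply List.ext_getElem
  · simp
  · intro m h1 h2
    simp only [List.getElem_drop, List.getElem_set]
    rw [if_neg (by omega), if_neg (by omega)]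

theorem pv_colA_inv (t : Nat) (c0 : List Int) :
    ∀ v : List Int, v.length = c0.length → t ≤ c0.length →
    v.drop t = (pvCompact c0).drop t →
    (v.take t).filter (fun x => x ≠ 0) =
      (c0.filter (fun x => x ≠ 0)).take
        (t - (c0.length - (c0.filter (fun x => x ≠ 0)).length)) →
    (List.range t).reverse.foldl (fun v i => pvColStep i v) v = pvCompact c0 := by
  induction t with
  | zero =>
      intro v hlen ht hd hf
      simpa using hd
  | succ t ih =>
      intro v hlen ht hd hf
      have hL : (c0.filter (fun x => x ≠ 0)).length ≤ c0.length := List.length_filter_le _ _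
      have htn : t < c0.length := by omega
      have htv : t < v.length := by omega
      have hcomplen : (pvCompact c0).length = c0.length := pv_length_compact c0
      have hr : (List.range (t+1)).reverse = t :: (List.range t).reverse := by
        rw [List.range_succ]; simp
      rw [hr, List.foldl_cons]
      have hfs : (v.take t).filter (fun x => x ≠ 0) ++ [v[t]'htv].filter (fun x => x ≠ 0) =
          (c0.filter (fun x => x ≠ 0)).take
            ((t+1) - (c0.length - (c0.filter (fun x => x ≠ 0)).length)) := by
        rw [← List.filter_append, ← pv_take_eq_concat v t htv]; exact hf
      by_cases hct : v[t]'htv = 0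
      · -- board[t] is zero: A scans upward
        have hfs2 : (v.take t).filter (fun x => x ≠ 0) =
            (c0.filter (fun x => x ≠ 0)).take
              ((t+1) - (c0.length - (c0.filter (fun x => x ≠ 0)).length)) := by
          rw [← hfs]; simp [hct]
        have hstep : pvColStep t v = pvColScan v t (List.range t).reverse := by
          rw [pvColStep, List.getD_eq_getElem v 0 htv, if_pos hct]
        rw [hstep]
        rcases pv_scan_spec t t v with ⟨he, hz0⟩ | ⟨k, hk, hknz, hbet, he⟩
        · -- nothing non-zero above: cell stays zero
          rw [he]
          have hft0 : (v.take t).filter (fun x => x ≠ 0) = [] :=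
            pv_filter_take_all_zero v t hz0
          have hnz0 := hfs2
          rw [hft0] at hnz0
          have hlen0 := congrArg List.length hnz0
          simp only [List.length_nil, List.length_take] at hlen0
          have htz : t < c0.length - (c0.filter (fun x => x ≠ 0)).length := by omega
          apply ih v hlen (by omega)
          · rw [List.drop_eq_getElem_cons htv,
                List.drop_eq_getElem_cons (show t < (pvCompact c0).length by omega)]
            rw [hct, pv_compact_getElem_lt c0 t htz]
            congr 1
          · rw [hft0, show t - (c0.length - (c0.filter (fun x => x ≠ 0)).length) = 0 by omega,
                List.take_zero]
        · -- swap with the nearest non-zero cell above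
          rw [he]
          have hkv : k < v.length := by omega
          have hknz' : v[k]'hkv ≠ 0 := by
            rw [List.getD_eq_getElem v 0 hkv] at hknz; exact hknz
          have hgdk : v.getD k 0 = v[k]'hkv := List.getD_eq_getElem v 0 hkv
          have hgdt : v.getD t 0 = 0 := by rw [List.getD_eq_getElem v 0 htv]; exact hct
          have hmid : ((v.take t).drop (k+1)).filter (fun x => x ≠ 0) = [] :=
            pv_filter_drop_between v k t hk hbet
          have htt : (v.take t).take (k+1) = v.take (k+1) := by
            rw [List.take_take]; congr 1; omega
          have hdecomp : v.take t = v.take k ++ [v[k]'hkv] ++ (v.take t).drop (k+1) := by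
            conv_lhs => rw [← List.take_append_drop (k+1) (v.take t)]
            rw [htt, pv_take_eq_concat v k hkv]
          have hfk : (v.take t).filter (fun x => x ≠ 0) =
              (v.take k).filter (fun x => x ≠ 0) ++ [v[k]'hkv] := by
            rw [hdecomp, List.filter_append, List.filter_append, hmid]
            simp [hknz']
          have hfs3 : (v.take k).filter (fun x => x ≠ 0) ++ [v[k]'hkv] =
              (c0.filter (fun x => x ≠ 0)).take
                ((t+1) - (c0.length - (c0.filter (fun x => x ≠ 0)).length)) := by
            rw [← hfk]; exact hfs2
          have hlen2 := congrArg List.length hfs3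
          simp only [List.length_append, List.length_take, List.length_cons,
            List.length_nil] at hlen2
          have htz : c0.length - (c0.filter (fun x => x ≠ 0)).length ≤ t := by omega
          have htzL : t - (c0.length - (c0.filter (fun x => x ≠ 0)).length) <
              (c0.filter (fun x => x ≠ 0)).length := by omega
          have hsplit2 : (c0.filter (fun x => x ≠ 0)).take
                ((t+1) - (c0.length - (c0.filter (fun x => x ≠ 0)).length)) =
              (c0.filter (fun x => x ≠ 0)).take
                (t - (c0.length - (c0.filter (fun x => x ≠ 0)).length)) ++
              [(c0.filter (fun x => x ≠ 0))[t - (c0.length -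
                  (c0.filter (fun x => x ≠ 0)).length)]'htzL] := by
            rw [show (t+1) - (c0.length - (c0.filter (fun x => x ≠ 0)).length) =
                  (t - (c0.length - (c0.filter (fun x => x ≠ 0)).length)) + 1 by omega]
            exact pv_take_eq_concat _ _ htzL
          rw [hsplit2] at hfs3
          rw [← List.concat_eq_append, ← List.concat_eq_append] at hfs3
          obtain ⟨hfk2, hck⟩ := List.concat_inj.mp hfs3
          apply ih _ (by simp [hlen]) (by omega)
          · -- the dropped suffix now starts with the swapped-down value
            have hvt' : t < ((v.set t (v.getD k 0)).set k (v.getD t 0)).length := by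
              simp; omega
            rw [List.drop_eq_getElem_cons hvt',
                List.drop_eq_getElem_cons (show t < (pvCompact c0).length by omega)]
            have hval : ((v.set t (v.getD k 0)).set k (v.getD t 0))[t]'hvt' =
                v.getD k 0 := by
              rw [List.getElem_set, if_neg (by omega), List.getElem_set, if_pos rfl]
            rw [hval, hgdk, hck, pv_compact_getElem_ge c0 t htz _ htzL]
            congr 1
            rw [pv_drop_succ_set v t k _ _ hk]
            simpa using hd
          · -- the processed prefix lost its last non-zero
            have h1 : ((v.set t (v.getD k 0)).set k (v.getD t 0)).take t =
                (v.take t).set k (v.getD t 0) := by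
              rw [pv_take_set_lt _ _ _ _ hk, pv_take_set_ge _ _ _ _ (le_refl t)]
            have hkl : (v.take k).length = k := by simp [List.length_take]; omega
            have h2 : (v.take t).set k 0 =
                v.take k ++ 0 :: (v.take t).drop (k+1) := by
              conv_lhs => rw [hdecomp]
              rw [List.append_assoc, List.singleton_append, List.set_append,
                  if_neg (by omega), hkl, Nat.sub_self, List.set_cons_zero]
            rw [h1, hgdt, h2, List.filter_append]
            have h3 : (0 :: (v.take t).drop (k+1)).filter (fun x => x ≠ 0) = [] := by
              rw [List.filter_cons_of_neg (by simp), hmid]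
            rw [h3, List.append_nil, ← List.concat_eq_append] at *
            exact hfk2
      · -- board[t] already non-zero: A leaves the cell alone
        have hfilt : [v[t]'htv].filter (fun x => x ≠ 0) = [v[t]'htv] := by
          simp [hct]
        rw [hfilt] at hfs
        have hlen2 := congrArg List.length hfs
        simp only [List.length_append, List.length_take, List.length_cons,
          List.length_nil] at hlen2
        have htz : c0.length - (c0.filter (fun x => x ≠ 0)).length ≤ t := by omega
        have htzL : t - (c0.length - (c0.filter (fun x => x ≠ 0)).length) <
            (c0.filter (fun x => x ≠ 0)).length := by omega
        have hsplit2 : (c0.filter (fun x => x ≠ 0)).take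
              ((t+1) - (c0.length - (c0.filter (fun x => x ≠ 0)).length)) =
            (c0.filter (fun x => x ≠ 0)).take
              (t - (c0.length - (c0.filter (fun x => x ≠ 0)).length)) ++
            [(c0.filter (fun x => x ≠ 0))[t - (c0.length -
                (c0.filter (fun x => x ≠ 0)).length)]'htzL] := by
          rw [show (t+1) - (c0.length - (c0.filter (fun x => x ≠ 0)).length) =
                (t - (c0.length - (c0.filter (fun x => x ≠ 0)).length)) + 1 by omega]
          exact pv_take_eq_concat _ _ htzL
        rw [hsplit2] at hfs
        rw [← List.concat_eq_append, ← List.concat_eq_append] at hfs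
        obtain ⟨hfk2, hck⟩ := List.concat_inj.mp hfs
        have hstep : pvColStep t v = v := by
          rw [pvColStep, List.getD_eq_getElem v 0 htv, if_neg hct]
        rw [hstep]
        apply ih v hlen (by omega)
        · rw [List.drop_eq_getElem_cons htv,
              List.drop_eq_getElem_cons (show t < (pvCompact c0).length by omega)]
          rw [hck, pv_compact_getElem_ge c0 t htz _ htzL]
          congr 1
        · exact hfk2

theorem pv_colA_eq_compact (c : List Int) : pvColA c.length c = pvCompact c := by
  have hL := List.length_filter_le (fun x => decide (x ≠ 0)) c
  apply pv_colA_inv c.length c c rfl (le_refl _)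
  · rw [List.drop_length, List.drop_eq_nil_of_le (by rw [pv_length_compact])]
  · rw [List.take_length, List.take_of_length_le (by omega)]

-- ---- generic getD / modify helpers ----
theorem pv_getD_set_self' {α : Type} (l : List α) (i : Nat) (v d : α) (h : i < l.length) :
    (l.set i v).getD i d = v := by
  simp [List.getD_eq_getElem?_getD, List.getElem?_set, h]

theorem pv_getD_set_ne' {α : Type} (l : List α) (i i' : Nat) (v d : α) (h : i ≠ i') :
    (l.set i v).getD i' d = l.getD i' d := by
  simp [List.getD_eq_getElem?_getD, List.getElem?_set, h]

theorem pv_getD_modify_self {α : Type} (l : List α) (i : Nat) (f : α → α) (d : α)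
    (h : i < l.length) : (l.modify i f).getD i d = f (l.getD i d) := by
  simp [List.getD_eq_getElem?_getD, List.getElem?_modify, List.getElem?_eq_getElem h]

theorem pv_getD_modify_ne {α : Type} (l : List α) (i i' : Nat) (f : α → α) (d : α)
    (h : i ≠ i') : (l.modify i f).getD i' d = l.getD i' d := by
  simp [List.getD_eq_getElem?_getD, List.getElem?_modify, h]

theorem pv_getD_out {α : Type} (l : List α) (i : Nat) (d : α) (h : l.length ≤ i) :
    l.getD i d = d := by
  simp [List.getD_eq_getElem?_getD, List.getElem?_eq_none (by omega : l.length ≤ i)]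

theorem pv_modify_id {α : Type} (l : List α) (i : Nat) : l.modify i (fun c => c) = l := by
  apply List.ext_getElem
  · simp
  · intro m h1 h2
    simp [List.getElem_modify]

theorem pv_modify_congr {α : Type} (l : List α) (i : Nat) (f g : α → α) (d : α)
    (h : i < l.length) (hfg : f (l.getD i d) = g (l.getD i d)) :
    l.modify i f = l.modify i g := by
  rw [List.getD_eq_getElem l d h] at hfg
  apply List.ext_getElem
  · simp
  · intro m h1 h2
    simp only [List.getElem_modify]
    split
    · next he => subst he; exact hfg
    · rfl

theorem pv_modify_modify {α : Type} (l : List α) (i : Nat) (f g : α → α) :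
    (l.modify i f).modify i g = l.modify i (fun c => g (f c)) := by
  apply List.ext_getElem
  · simp
  · intro m h1 h2
    simp only [List.getElem_modify]
    split <;> rfl

theorem pv_mapIdx_const {α β : Type} (g : α → β) (l : List α) :
    l.mapIdx (fun _ x => g x) = l.map g := by
  apply List.ext_getElem
  · simp
  · intro m h1 h2
    simp [List.getElem_mapIdx]

-- foldl of pointwise modifies over range = mapIdx
theorem pv_foldl_modify_shift {α : Type} (g : Nat → α → α) (is : List Nat) (x : α) (l : List α) :
    (is.map Nat.succ).foldl (fun acc n => acc.modify n (g n)) (x :: l) =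
      x :: is.foldl (fun acc n => acc.modify n (g (n+1))) l := by
  induction is generalizing l with
  | nil => rfl
  | cons k ks ih => simp only [List.map_cons, List.foldl_cons]; exact ih _

theorem pv_foldl_modify_range {α : Type} (f : Nat → α → α) (l : List α) :
    (List.range l.length).foldl (fun acc n => acc.modify n (f n)) l = l.mapIdx f := by
  induction l generalizing f with
  | nil => rfl
  | cons a l ih =>
      rw [List.length_cons, List.range_succ_eq_map, List.foldl_cons]
      have h0 : (a :: l).modify 0 (f 0) = f 0 a :: l := rfl
      rw [h0, pv_foldl_modify_shift, ih (fun n => f (n+1)), List.mapIdx_cons]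

theorem pv_foldl_map_swap (g : Nat → List Int → List Int) (is : List Nat) (cs : List (List Int)) :
    is.foldl (fun cs i => cs.map (g i)) cs = cs.map (fun c => is.foldl (fun c i => g i c) c) := by
  induction is generalizing cs with
  | nil => simp
  | cons i is ih => simp only [List.foldl_cons]; rw [ih, List.map_map]; rfl

-- ---- recompose basics ----
theorem pv_recompose_row (board cs : List (List Int)) (i : Nat) (h : i < board.length) :
    (pvRecompose board cs)[i]'(by simpa [pvRecompose] using h) =
      board[i].mapIdx (fun j x => if j < cs.length then (cs.getD j []).getD i 0 else x) := by
  simp [pvRecompose]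

theorem pv_recompose_head_len (board cs : List (List Int)) :
    ((pvRecompose board cs).headD []).length = (board.headD []).length := by
  cases board with
  | nil => rfl
  | cons r rs => simp [pvRecompose]

-- invariant on the column list
def pvCsOK (board cs : List (List Int)) : Prop :=
  cs.length = (board.headD []).length ∧ ∀ c ∈ cs, c.length = board.length

theorem pv_cols_getD (board : List (List Int)) (j : Nat)
    (hj : j < (board.headD []).length) :
    (pvCols board).getD j [] = board.map (fun row => row.getD j 0) := by
  simp only [pvCols, List.getD_eq_getElem?_getD, List.getElem?_map]
  rw [List.getElem?_range (by simpa [List.headD_eq_head?_getD] using hj)]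
  rfl

theorem pv_map_getD (board : List (List Int)) (i j : Nat) (hi : i < board.length) :
    (board.map (fun row => row.getD j 0)).getD i 0 = (board[i]'hi).getD j 0 := by
  simp [List.getD_eq_getElem?_getD, List.getElem?_map, List.getElem?_eq_getElem hi]

theorem pv_recompose_init (board : List (List Int)) :
    board = pvRecompose board (pvCols board) := by
  apply List.ext_getElem
  · simp [pvRecompose]
  · intro i h1 h2
    rw [pv_recompose_row board (pvCols board) i h1]
    apply List.ext_getElem
    · simp
    · intro j hj1 hj2
      simp only [List.getElem_mapIdx]
      split
      · next hjw =>
          have hjw' : j < (board.headD []).length := by simpa [pvCols] using hjw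
          rw [pv_cols_getD board j hjw', pv_map_getD board i j h1,
              List.getD_eq_getElem _ 0 hj1]
      · rfl

theorem pv_cols_ok (board : List (List Int)) : pvCsOK board (pvCols board) := by
  constructor
  · simp [pvCols]
  · intro c hc
    rcases List.mem_map.mp hc with ⟨j, _, rfl⟩
    simp

-- ---- reads and writes through pvRecompose ----
theorem pv_cell_recompose (board cs : List (List Int)) (hP : Pre_gravity board)
    (hok : pvCsOK board cs) (i j : Nat) :
    pvCell (pvRecompose board cs) i j =
      if j < cs.length then (cs.getD j []).getD i 0 else pvCell board i j := by
  obtain ⟨hw, hlen⟩ := hok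
  unfold pvCell
  by_cases hi : i < board.length
  · have hrow : (pvRecompose board cs).getD i [] =
        board[i].mapIdx (fun j x => if j < cs.length then (cs.getD j []).getD i 0 else x) := by
      rw [List.getD_eq_getElem _ [] (by simpa [pvRecompose] using hi),
          pv_recompose_row board cs i hi]
    rw [hrow, List.getD_eq_getElem _ [] hi]
    by_cases hjr : j < board[i].length
    · rw [List.getD_eq_getElem _ 0 (by simpa using hjr), List.getElem_mapIdx]
      split
      · rfl
      · rw [List.getD_eq_getElem _ 0 hjr]
    · have hwr : (board.headD []).length ≤ board[i].length :=
        hP _ (List.getElem_mem hi)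
      have hjcs : ¬ j < cs.length := by omega
      rw [if_neg hjcs, pv_getD_out _ _ _ (by simpa using hjr),
          pv_getD_out _ _ _ (by omega)]
  · have h1 : (pvRecompose board cs).getD i [] = [] :=
      pv_getD_out _ _ _ (by simp [pvRecompose]; omega)
    have h2 : board.getD i [] = [] := pv_getD_out _ _ _ (by omega)
    rw [h1, h2]
    split
    · next hj =>
        have hcj : (cs.getD j []) ∈ cs := by
          rw [List.getD_eq_getElem _ [] hj]; exact List.getElem_mem hj
        have h3 := pv_getD_out (cs.getD j []) i 0 (by rw [hlen _ hcj]; omega)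
        simpa [List.getD_eq_getElem?_getD] using h3.symm
    · simp

theorem pv_set_recompose (board cs : List (List Int)) (hP : Pre_gravity board)
    (hok : pvCsOK board cs) (i j : Nat) (v : Int) (hi : i < board.length) (hj : j < cs.length) :
    pvSetCell (pvRecompose board cs) i j v =
      pvRecompose board (cs.modify j (fun c => c.set i v)) := by
  obtain ⟨hw, hlen⟩ := hok
  unfold pvSetCell
  apply List.ext_getElem
  · simp [pvRecompose]
  · intro i' h1 h2
    have hi' : i' < board.length := by simpa [pvRecompose] using h2
    rw [List.getElem_modify, pv_recompose_row board cs i' hi',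
        pv_recompose_row board _ i' hi']
    have hcsl : (cs.modify j (fun c => c.set i v)).length = cs.length := by simp
    split
    · next hii =>
        subst hii
        apply List.ext_getElem
        · simp
        · intro j' hj1 hj2
          have hj' : j' < board[i].length := by simpa using hj1
          simp only [List.getElem_set, List.getElem_mapIdx, hcsl]
          by_cases hjj : j = j'
          · subst hjj
            rw [if_pos rfl, if_pos (by omega), pv_getD_modify_self _ _ _ _ hj,
                pv_getD_set_self']
            have : cs.getD j [] ∈ cs := by
              rw [List.getD_eq_getElem _ [] hj]; exact List.getElem_mem hj
            rw [hlen _ this]; exact hi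
          · rw [if_neg hjj, pv_getD_modify_ne _ _ _ _ _ (by omega)]
    · next hii =>
        apply List.ext_getElem
        · simp
        · intro j' hj1 hj2
          simp only [List.getElem_mapIdx, hcsl]
          split
          · next hj'cs =>
              by_cases hjj : j = j'
              · subst hjj
                rw [pv_getD_modify_self _ _ _ _ hj, pv_getD_set_ne' _ _ _ _ _ (by omega)]
              · rw [pv_getD_modify_ne _ _ _ _ _ (by omega)]
          · rfl

-- ---- csOK bookkeeping ----
theorem pv_csOK_modify (board cs : List (List Int)) (j : Nat) (f : List Int → List Int)
    (hok : pvCsOK board cs) (hf : ∀ c, (f c).length = c.length) :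
    pvCsOK board (cs.modify j f) := by
  obtain ⟨hw, hlen⟩ := hok
  refine ⟨by simpa using hw, ?_⟩
  intro c hc
  rcases List.mem_iff_getElem.mp hc with ⟨m, hm, rfl⟩
  rw [List.getElem_modify]
  split
  · rw [hf]; exact hlen _ (List.getElem_mem _)
  · exact hlen _ (List.getElem_mem _)

theorem pv_csOK_map (board cs : List (List Int)) (f : List Int → List Int)
    (hok : pvCsOK board cs) (hf : ∀ c, (f c).length = c.length) :
    pvCsOK board (cs.map f) := by
  obtain ⟨hw, hlen⟩ := hok
  refine ⟨by simpa using hw, ?_⟩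
  intro c hc
  rcases List.mem_map.mp hc with ⟨c', hc', rfl⟩
  rw [hf]; exact hlen _ hc'

-- ---- transporting A's loops to column operations ----
theorem pvKScan_cons (b : List (List Int)) (i j k : Nat) (ks : List Nat) :
    pvKScan b i j (k :: ks) =
      if pvCell b k j ≠ 0 then pvSetCell (pvSetCell b i j (pvCell b k j)) k j (pvCell b i j)
      else pvKScan b i j ks := rfl

theorem pv_kscan_recompose (board cs : List (List Int)) (hP : Pre_gravity board)
    (hok : pvCsOK board cs) (i j : Nat) (hi : i < board.length) (hj : j < cs.length)
    (ks : List Nat) (hks : ∀ k ∈ ks, k < board.length) :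
    pvKScan (pvRecompose board cs) i j ks =
      pvRecompose board (cs.modify j (fun c => pvColScan c i ks)) := by
  induction ks with
  | nil =>
      rw [pvKScan, pv_modify_congr cs j _ (fun c => c) [] hj (by rw [pvColScan]), pv_modify_id]
  | cons k ks ih =>
      have hcell : ∀ m, pvCell (pvRecompose board cs) m j = (cs.getD j []).getD m 0 := by
        intro m
        rw [pv_cell_recompose board cs hP hok m j, if_pos hj]
      by_cases hkz : (cs.getD j []).getD k 0 ≠ 0
      · have hR : cs.modify j (fun c => pvColScan c i (k :: ks)) =
            cs.modify j (fun c =>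
              (c.set i ((cs.getD j []).getD k 0)).set k ((cs.getD j []).getD i 0)) := by
          apply pv_modify_congr cs j _ _ [] hj
          rw [pvColScan_cons, if_pos hkz]
        rw [hR, pvKScan_cons, if_pos (by rw [hcell]; exact hkz), hcell, hcell,
            pv_set_recompose board cs hP hok i j _ hi hj,
            pv_set_recompose board _ hP
              (pv_csOK_modify board cs j _ hok (by intro c; simp)) k j _
              (hks k (by simp)) (by simpa using hj),
            pv_modify_modify]
      · have hR : cs.modify j (fun c => pvColScan c i (k :: ks)) =
            cs.modify j (fun c => pvColScan c i ks) := by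
          apply pv_modify_congr cs j _ _ [] hj
          rw [pvColScan_cons, if_neg hkz]
        rw [hR, pvKScan_cons, if_neg (by rw [hcell]; exact hkz)]
        exact ih (fun m hm => hks m (by simp [hm]))

theorem pvCellOp_eq (i : Nat) (b : List (List Int)) (j : Nat) :
    pvCellOp i b j =
      if pvCell b i j = 0 then pvKScan b i j (List.range i).reverse else b := rfl

theorem pvColStep_eq (i : Nat) (c : List Int) :
    pvColStep i c = if c.getD i 0 = 0 then pvColScan c i (List.range i).reverse else c := rfl

theorem pv_cellop_recompose (board cs : List (List Int)) (hP : Pre_gravity board)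
    (hok : pvCsOK board cs) (i j : Nat) (hi : i < board.length) (hj : j < cs.length) :
    pvCellOp i (pvRecompose board cs) j =
      pvRecompose board (cs.modify j (pvColStep i)) := by
  have hcell : pvCell (pvRecompose board cs) i j = (cs.getD j []).getD i 0 := by
    rw [pv_cell_recompose board cs hP hok i j, if_pos hj]
  rw [pvCellOp_eq,
      pv_modify_congr cs j (pvColStep i)
        (fun c => if (cs.getD j []).getD i 0 = 0 then pvColScan c i (List.range i).reverse else c)
        [] hj (by rw [pvColStep_eq])]
  by_cases hz : (cs.getD j []).getD i 0 = 0
  · rw [if_pos (by rw [hcell]; exact hz)]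
    rw [pv_kscan_recompose board cs hP hok i j hi hj _
          (by intro k hk; simp at hk; omega),
        pv_modify_congr cs j _ _ [] hj]
    rw [if_pos hz]
  · rw [if_neg (by rw [hcell]; exact hz)]
    rw [pv_modify_congr cs j _ (fun c => c) [] hj (by rw [if_neg hz]), pv_modify_id]

theorem pv_jfold_recompose (board : List (List Int)) (hP : Pre_gravity board)
    (i : Nat) (hi : i < board.length) (js : List Nat) :
    ∀ cs, pvCsOK board cs → (∀ j ∈ js, j < cs.length) →
    js.foldl (pvCellOp i) (pvRecompose board cs) =
      pvRecompose board (js.foldl (fun cs j => cs.modify j (pvColStep i)) cs) := by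
  induction js with
  | nil => intro cs _ _; rfl
  | cons j js ih =>
      intro cs hok hjs
      rw [List.foldl_cons, List.foldl_cons,
          pv_cellop_recompose board cs hP hok i j hi (hjs j (by simp))]
      exact ih _ (pv_csOK_modify board cs j _ hok (fun c => pv_length_colStep i c))
        (fun j' hj' => by rw [List.length_modify]; exact hjs j' (by simp [hj']))

theorem pv_outer_recompose (board : List (List Int)) (hP : Pre_gravity board)
    (is : List Nat) :
    ∀ cs, pvCsOK board cs → (∀ i ∈ is, i < board.length) →
    is.foldl (fun b i => (List.range (b.headD []).length).foldl (pvCellOp i) b)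
        (pvRecompose board cs) =
      pvRecompose board (is.foldl (fun cs i => cs.map (pvColStep i)) cs) := by
  induction is with
  | nil => intro cs _ _; rfl
  | cons i is ih =>
      intro cs hok his
      rw [List.foldl_cons, List.foldl_cons, pv_recompose_head_len, ← hok.1,
          pv_jfold_recompose board hP i (his i (by simp)) (List.range cs.length) cs hok
            (fun j hj => List.mem_range.mp hj),
          pv_foldl_modify_range (fun _ => pvColStep i) cs, pv_mapIdx_const]
      exact ih _ (pv_csOK_map board cs _ hok (fun c => pv_length_colStep i c))
        (fun i' hi' => his i' (by simp [hi']))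

-- A's whole loop nest, per column
theorem pv_gravity_eq (board : List (List Int)) (hP : Pre_gravity board) :
    gravity board =
      pvRecompose board ((pvCols board).map (pvColA board.length)) := by
  have h := pv_outer_recompose board hP ((List.range board.length).reverse)
    (pvCols board) (pv_cols_ok board)
    (fun i hi => by simp only [List.mem_reverse, List.mem_range] at hi; exact hi)
  rw [← pv_recompose_init board] at h
  rw [gravity, h, pv_foldl_map_swap]
  rfl

-- ---- B's expression, per column ----
theorem pv_cols_length (board : List (List Int)) :
    (pvCols board).length = (board.headD []).length := by simp [pvCols]

-- ---- B's per-column write-back ----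
-- extracting column j of a recomposed board gives the tracked column
theorem pv_col_extract (board cs : List (List Int)) (hP : Pre_gravity board)
    (hok : pvCsOK board cs) (j : Nat) (hj : j < cs.length) :
    (pvRecompose board cs).map (fun row => row.getD j 0) = cs.getD j [] := by
  have hgd : cs.getD j [] ∈ cs := by
    rw [List.getD_eq_getElem _ [] hj]; exact List.getElem_mem hj
  have hcl : (cs.getD j []).length = board.length := hok.2 _ hgd
  apply List.ext_getElem
  · simp [pvRecompose]
    simpa [List.getD_eq_getElem?_getD] using hcl.symm
  · intro i h1 h2
    have hi : i < board.length := by simpa [pvRecompose] using h1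
    have hcell := pv_cell_recompose board cs hP hok i j
    rw [if_pos hj] at hcell
    unfold pvCell at hcell
    rw [List.getD_eq_getElem _ []
      (show i < (pvRecompose board cs).length by simpa [pvRecompose] using hi)] at hcell
    rw [List.getElem_map, hcell, List.getD_eq_getElem _ 0 (by omega)]

-- writing a full column back ('for row, v in zip(board, new_col): row[j] = v')
theorem pv_colwrite_recompose (board cs : List (List Int)) (hP : Pre_gravity board)
    (hok : pvCsOK board cs) (j : Nat) (hj : j < cs.length) (c' : List Int)
    (hc' : c'.length = board.length) :
    ((pvRecompose board cs).zip c').map (fun p => p.1.set j p.2) =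
      pvRecompose board (cs.modify j (fun _ => c')) := by
  apply List.ext_getElem
  · simp [pvRecompose, hc']
  · intro i h1 h2
    have hi : i < board.length := by simpa [pvRecompose] using h2
    have hic : i < c'.length := by omega
    simp only [List.getElem_map, List.getElem_zip]
    rw [pv_recompose_row board cs i hi, pv_recompose_row board _ i hi]
    have hcsl : (cs.modify j (fun _ => c')).length = cs.length := by simp
    apply List.ext_getElem
    · simp
    · intro j' hj1 hj2
      simp only [List.getElem_set, List.getElem_mapIdx, hcsl]
      by_cases hjj : j = j'
      · subst hjj
        rw [if_pos rfl, if_pos hj, pv_getD_modify_self _ _ _ _ hj,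
            List.getD_eq_getElem c' 0 hic]
      · rw [if_neg hjj]
        split
        · rw [pv_getD_modify_ne _ _ _ _ _ hjj]
        · rfl

-- one step of B's j-loop on a recomposed board compacts the tracked column j
theorem pv_bstep_recompose (board cs : List (List Int)) (hP : Pre_gravity board)
    (hok : pvCsOK board cs) (j : Nat) (hj : j < cs.length) :
    ((pvRecompose board cs).zip
        (List.replicate
            ((((pvRecompose board cs).map (fun row => row.getD j 0)).length -
              (((pvRecompose board cs).map (fun row => row.getD j 0)).filter
                (fun x => x ≠ 0)).length)) 0 ++
          ((pvRecompose board cs).map (fun row => row.getD j 0)).filter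
            (fun x => x ≠ 0))).map (fun p => p.1.set j p.2) =
      pvRecompose board (cs.modify j (fun c => pvCompact c)) := by
  have hgd : cs.getD j [] ∈ cs := by
    rw [List.getD_eq_getElem _ [] hj]; exact List.getElem_mem hj
  have hcl : (cs.getD j []).length = board.length := hok.2 _ hgd
  rw [pv_col_extract board cs hP hok j hj,
      show List.replicate ((cs.getD j []).length -
          ((cs.getD j []).filter (fun x => x ≠ 0)).length) 0 ++
        (cs.getD j []).filter (fun x => x ≠ 0) = pvCompact (cs.getD j []) from rfl,
      pv_colwrite_recompose board cs hP hok j hj _ (by rw [pv_length_compact, hcl])]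
  congr 1
  exact pv_modify_congr cs j _ _ [] hj rfl

-- B's whole j-loop
theorem pv_bfold_recompose (board : List (List Int)) (hP : Pre_gravity board)
    (js : List Nat) :
    ∀ cs, pvCsOK board cs → (∀ j ∈ js, j < cs.length) →
    js.foldl (fun b j =>
        let column := b.map (fun row => row.getD j 0)
        let nz := column.filter (fun x => x ≠ 0)
        let newCol := List.replicate (column.length - nz.length) 0 ++ nz
        (b.zip newCol).map (fun p => p.1.set j p.2)) (pvRecompose board cs) =
      pvRecompose board (js.foldl (fun cs j => cs.modify j (fun c => pvCompact c)) cs) := by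
  induction js with
  | nil => intro cs _ _; rfl
  | cons j js ih =>
      intro cs hok hjs
      rw [List.foldl_cons, List.foldl_cons]
      have hok' := pv_csOK_modify board cs j (fun c => pvCompact c) hok
        (fun c => pv_length_compact c)
      have hrec := ih (cs.modify j (fun c => pvCompact c)) hok'
        (fun j' hj' => by rw [List.length_modify]; exact hjs j' (by simp [hj']))
      rw [← hrec]
      congr 1
      exact pv_bstep_recompose board cs hP hok j (hjs j (by simp))

theorem pv_alt_eq (board : List (List Int)) (hP : Pre_gravity board) :
    gravity_alt board = pvRecompose board ((pvCols board).map pvCompact) := by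
  by_cases hb : board = []
  · subst hb; rfl
  · rw [gravity_alt, if_neg hb]
    have h0 := pv_bfold_recompose board hP (List.range (pvCols board).length)
      (pvCols board) (pv_cols_ok board) (fun j hj => List.mem_range.mp hj)
    rw [← pv_recompose_init board,
        pv_foldl_modify_range (fun _ => fun c => pvCompact c) (pvCols board),
        pv_mapIdx_const] at h0
    rw [← pv_cols_length board]
    exact h0

-- ===== VERDICT (by name: the statement is the Claim_ definition above) =====
theorem gravity_spec : Claim_equal_gravity := by
  intro board _ hP
  unfold Spec_gravity
  rw [pv_gravity_eq board hP, pv_alt_eq board hP]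
  congr 1
  apply List.map_congr_left
  intro c hc
  have hcl : c.length = board.length := (pv_cols_ok board).2 c hc
  rw [← hcl]
  exact pv_colA_eq_compact c
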